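-- pv_equiv track=rewrite | github.com/yashkens/dream | models/postprocessor.py | tag_mate_gooser_name
-- ===== SOURCE A (Python) =====
-- from typing import Sequence, List, Tuple, Callable, Dict
--
-- def tag_mate_gooser_name(
--     tokens: List[str], tags: List[str], person_tag: str = "PER", mate_tag: str = "MATE-GOOSER"
-- ) -> Tuple[List[str], List[str]]:
--     if "B-" + person_tag not in tags:
--         return tokens, tags
--     out_tags = []
--     i = 0
--     while i < len(tokens):
--         tok, tag = tokens[i], tags[i]
--         if i + 1 < len(tokens):
--             if (tok == ",") and (tags[i + 1] == "B-" + person_tag):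
--                 # it might be mate gooser name
--                 out_tags.append(tag)
--                 j = 1
--                 while (i + j < len(tokens)) and (tags[i + j][2:] == person_tag):
--                     j += 1
--                 if (i + j == len(tokens)) or (tokens[i + j][0] in ",.!?;)"):
--                     # it is mate gooser
--                     out_tags.extend([t[:2] + mate_tag for t in tags[i + 1 : i + j]])
--                 else:
--                     # it isn't
--                     out_tags.extend(tags[i + 1 : i + j])
--                 i += j
--                 continue
--         if i > 0:
--             if (tok == ",") and (tags[i - 1][2:] == person_tag):
--                 # it might have been mate gooser name
--                 j = 1
--                 while (len(out_tags) >= j) and (out_tags[-j][2:] == person_tag):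
--                     j += 1
--                 if (len(out_tags) < j) or (tokens[i - j][-1] in ",.!?("):
--                     # it was mate gooser
--                     for k in range(j - 1):
--                         out_tags[-k - 1] = out_tags[-k - 1][:2] + mate_tag
--                 out_tags.append(tag)
--                 i += 1
--                 continue
--         out_tags.append(tag)
--         i += 1
--     return tokens, out_tags
-- ===== SOURCE B (Python) =====
-- def _trailing(seg, person_tag):
--     c = 0
--     for t in reversed(seg):
--         if t[2:] != person_tag:
--             break
--         c += 1
--     return c
--
--
-- def tag_mate_gooser_name(tokens, tags, person_tag="PER", mate_tag="MATE-GOOSER"):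
--     begin = "B-" + person_tag
--     if begin not in tags:
--         return tokens, tags
--     n = len(tokens)
--     # pre-pass: ends[k] = first index >= k whose tag is not a person tag (or n)
--     ends = list(range(n + 1))
--     for k in range(n - 1, -1, -1):
--         if tags[k][2:] == person_tag:
--             ends[k] = ends[k + 1]
--     out = []
--     streak = 0  # number of trailing entries of out whose [2:] == person_tag
--     i = 0
--     while i < n:
--         tok, tag = tokens[i], tags[i]
--         if i + 1 < n and tok == "," and tags[i + 1] == begin:
--             e = ends[i + 1]
--             run = tags[i + 1 : e]
--             if e == n or tokens[e][0] in ",.!?;)":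
--                 run = [t[:2] + mate_tag for t in run]
--             app = [tag] + run
--             tc = _trailing(app, person_tag)
--             streak = streak + tc if tc == len(app) else tc
--             out += app
--             i = e
--             continue
--         if i > 0 and tok == "," and tags[i - 1][2:] == person_tag:
--             if streak == len(out) or tokens[i - 1 - streak][-1] in ",.!?(":
--                 cut = len(out) - streak
--                 retagged = [t[:2] + mate_tag for t in out[cut:]]
--                 out[cut:] = retagged
--                 streak = _trailing(retagged, person_tag)
--             streak = streak + 1 if tag[2:] == person_tag else 0
--             out.append(tag)
--             i += 1
--             continue
--         streak = streak + 1 if tag[2:] == person_tag else 0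
--         out.append(tag)
--         i += 1
--     return tokens, out
-- ===== Notes on version B (the rewrite author's own statement) =====
-- stated objective: alternative
-- what changed: B precomputes a run-end table for person-tag runs in one backward pre-pass and maintains a counter of the trailing person-tagged output entries, so A's inner forward scan becomes a table lookup and A's inner backward re-scan of out_tags disappears; retagging is done by slicing and mapping instead of negative-index in-place assignment.
import Mathlib
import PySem

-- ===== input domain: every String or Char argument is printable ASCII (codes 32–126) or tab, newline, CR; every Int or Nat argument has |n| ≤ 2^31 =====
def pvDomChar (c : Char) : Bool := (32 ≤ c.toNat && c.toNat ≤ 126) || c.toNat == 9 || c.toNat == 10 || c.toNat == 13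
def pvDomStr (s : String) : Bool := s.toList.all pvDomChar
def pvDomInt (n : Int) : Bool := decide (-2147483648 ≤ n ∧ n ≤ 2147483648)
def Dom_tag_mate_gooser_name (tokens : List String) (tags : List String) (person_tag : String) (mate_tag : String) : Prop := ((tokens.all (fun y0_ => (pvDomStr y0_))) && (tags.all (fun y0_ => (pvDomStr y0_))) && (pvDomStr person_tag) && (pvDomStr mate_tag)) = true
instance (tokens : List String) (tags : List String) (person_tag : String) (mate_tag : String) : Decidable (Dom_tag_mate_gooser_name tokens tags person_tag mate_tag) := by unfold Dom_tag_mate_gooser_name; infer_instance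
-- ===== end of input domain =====

-- B replaces A's inner forward tag scan by a precomputed run-end table and A's inner
-- backward re-scan of out_tags by a maintained trailing-person counter (objective: alternative).

-- ===== PORT A =====
-- shared string primitives (Python t[2:], t[:2], t[0] in cs, t[-1] in cs, t[:2]+mate)
def pvDrop2 (t : String) : String := String.ofList (t.toList.drop 2)
def pvTake2 (t : String) : String := String.ofList (t.toList.take 2)
def pvHeadIn (t : String) (cs : List Char) : Bool :=
  match t.toList with
  | [] => false          -- Python raises here; excluded by Pre_
  | c :: _ => cs.contains c
def pvLastIn (t : String) (cs : List Char) : Bool :=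
  match t.toList.getLast? with
  | none => false        -- Python raises here; excluded by Pre_
  | some c => cs.contains c
def pvIsPer (person t : String) : Bool := pvDrop2 t == person
def pvRetag (mate t : String) : String := pvTake2 t ++ mate

-- A's inner forward scan: j = 1; while i+j < n and tags[i+j][2:] == person: j += 1
def pvScanFA (tags : List String) (person : String) (n i j : Nat) : Nat :=
  if h : i + j < n ∧ pvIsPer person (tags.getD (i + j) "") = true then
    pvScanFA tags person n i (j + 1)
  else j
termination_by n - (i + j)
decreasing_by omega

theorem pvScanFA_ge (tags : List String) (person : String) (n i j : Nat) :
    j ≤ pvScanFA tags person n i j := by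
  fun_induction pvScanFA tags person n i j with
  | case1 j h ih => omega
  | case2 j h => omega

-- A's inner backward scan: j = 1; while len(out) >= j and out[-j][2:] == person: j += 1
def pvScanBA (person : String) (out : List String) (j : Nat) : Nat :=
  if h : j ≤ out.length ∧ pvIsPer person (out.getD (out.length - j) "") = true then
    pvScanBA person out (j + 1)
  else j
termination_by out.length + 1 - j

-- A's retag loop: for k in range(j-1): out[-k-1] = out[-k-1][:2] + mate
def pvRetagLoopA (mate : String) (out : List String) (j : Nat) : List String :=
  (List.range (j - 1)).foldl
    (fun o k => o.set (o.length - k - 1) (pvRetag mate (o.getD (o.length - k - 1) ""))) out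

-- A's main while loop
def pvGoA (tokens tags : List String) (person mate : String) (i : Nat) (out : List String) :
    List String :=
  if h : i < tokens.length then
    let tok := tokens.getD i ""
    let tag := tags.getD i ""
    if i + 1 < tokens.length ∧ tok = "," ∧ tags.getD (i + 1) "" = "B-" ++ person then
      let j := pvScanFA tags person tokens.length i 1
      let run := PySem.List.slice tags (some ((i + 1 : Nat) : Int)) (some ((i + j : Nat) : Int))
      let newr :=
        if i + j = tokens.length ∨
            pvHeadIn (tokens.getD (i + j) "") [',', '.', '!', '?', ';', ')'] = true then
          run.map (pvRetag mate)
        else run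
      pvGoA tokens tags person mate (i + j) (out ++ tag :: newr)
    else if 0 < i ∧ tok = "," ∧ pvIsPer person (tags.getD (i - 1) "") = true then
      let j := pvScanBA person out 1
      let out2 :=
        if out.length < j ∨ pvLastIn (tokens.getD (i - j) "") [',', '.', '!', '?', '('] = true then
          pvRetagLoopA mate out j
        else out
      pvGoA tokens tags person mate (i + 1) (out2 ++ [tag])
    else
      pvGoA tokens tags person mate (i + 1) (out ++ [tag])
  else out
termination_by tokens.length - i
decreasing_by
  · have := pvScanFA_ge tags person tokens.length i 1; omega
  · omega
  · omega

def tag_mate_gooser_name (tokens : List String) (tags : List String) (person_tag : String)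
    (mate_tag : String) : List String × List String :=
  if tags.contains ("B-" ++ person_tag) then
    (tokens, pvGoA tokens tags person_tag mate_tag 0 [])
  else (tokens, tags)

-- ===== PORT B =====
-- Source B's _trailing: count of trailing entries of seg with seg[k][2:] == person
def pvTrailB (person : String) (seg : List String) : Nat :=
  (seg.reverse.takeWhile (fun t => pvIsPer person t)).length

-- Source B's pre-pass: ends[k] = first index >= k whose tag is not a person tag (or n)
def pvEndsB (tags : List String) (person : String) (n : Nat) : List Nat :=
  (List.range n).foldr
    (fun k acc => (if pvIsPer person (tags.getD k "") = true then acc.headD n else k) :: acc) [n]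

-- Source B's main while loop (fuel = n bounds the number of iterations: i strictly increases)
def pvGoB (tokens tags : List String) (person mate beg : String) (ends : List Nat) :
    Nat → Nat → List String → Nat → List String
  | 0, _, out, _ => out
  | fuel + 1, i, out, streak =>
    if i < tokens.length then
      let tok := tokens.getD i ""
      let tag := tags.getD i ""
      if i + 1 < tokens.length ∧ tok = "," ∧ tags.getD (i + 1) "" = beg then
        let e := ends.getD (i + 1) tokens.length
        let run := PySem.List.slice tags (some ((i + 1 : Nat) : Int)) (some ((e : Nat) : Int))
        let newr :=
          if e = tokens.length ∨
              pvHeadIn (tokens.getD e "") [',', '.', '!', '?', ';', ')'] = true then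
            run.map (pvRetag mate)
          else run
        let app := tag :: newr
        let tc := pvTrailB person app
        let streak' := if tc = app.length then streak + tc else tc
        pvGoB tokens tags person mate beg ends fuel e (out ++ app) streak'
      else if 0 < i ∧ tok = "," ∧ pvIsPer person (tags.getD (i - 1) "") = true then
        if streak = out.length ∨
            pvLastIn (tokens.getD (i - 1 - streak) "") [',', '.', '!', '?', '('] = true then
          let cut := out.length - streak
          let retagged := (out.drop cut).map (pvRetag mate)
          let out2 := out.take cut ++ retagged
          let streak' := if pvIsPer person tag = true then pvTrailB person retagged + 1 else 0
          pvGoB tokens tags person mate beg ends fuel (i + 1) (out2 ++ [tag]) streak'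
        else
          pvGoB tokens tags person mate beg ends fuel (i + 1) (out ++ [tag])
            (if pvIsPer person tag = true then streak + 1 else 0)
      else
        pvGoB tokens tags person mate beg ends fuel (i + 1) (out ++ [tag])
          (if pvIsPer person tag = true then streak + 1 else 0)
    else out

def tag_mate_gooser_name_alt (tokens : List String) (tags : List String) (person_tag : String)
    (mate_tag : String) : List String × List String :=
  if tags.contains ("B-" ++ person_tag) then
    (tokens,
      pvGoB tokens tags person_tag mate_tag ("B-" ++ person_tag)
        (pvEndsB tags person_tag tokens.length) tokens.length 0 [] 0)
  else (tokens, tags)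

-- ===== PRECONDITION & SPEC =====
-- Pre_ excludes exactly the inputs on which A's index accesses can raise once the retag
-- machinery runs: tags shorter than tokens (IndexError on tags[i]) and empty-string tokens
-- (IndexError on tokens[..][0] / [-1]); on a few such inputs the offending position is never
-- reached and A still returns — B returns the same value there (see cites).
def Pre_tag_mate_gooser_name (tokens : List String) (tags : List String) (person_tag : String)
    (mate_tag : String) : Prop :=
  tags.contains ("B-" ++ person_tag) = true → (tokens.length ≤ tags.length ∧ "" ∉ tokens)
instance (tokens : List String) (tags : List String) (person_tag : String) (mate_tag : String) :
    Decidable (Pre_tag_mate_gooser_name tokens tags person_tag mate_tag) := by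
  unfold Pre_tag_mate_gooser_name; infer_instance

def pvWitness_tag_mate_gooser_name : List String × List String × String × String :=
  (["Hi", ",", "Bob", ","], ["O", "O", "B-PER", "O"], "PER", "MATE-GOOSER")

def Spec_tag_mate_gooser_name (tokens : List String) (tags : List String) (person_tag : String)
    (mate_tag : String) (out : List String × List String) : Prop :=
  out = tag_mate_gooser_name_alt tokens tags person_tag mate_tag
instance (tokens : List String) (tags : List String) (person_tag : String) (mate_tag : String)
    (out : List String × List String) :
    Decidable (Spec_tag_mate_gooser_name tokens tags person_tag mate_tag out) := by
  unfold Spec_tag_mate_gooser_name; infer_instance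

-- ===== CLAIM =====
def Claim_equal_tag_mate_gooser_name : Prop := ∀ (tokens : List String) (tags : List String) (person_tag : String) (mate_tag : String), Dom_tag_mate_gooser_name tokens tags person_tag mate_tag → Pre_tag_mate_gooser_name tokens tags person_tag mate_tag → Spec_tag_mate_gooser_name tokens tags person_tag mate_tag (tag_mate_gooser_name tokens tags person_tag mate_tag)

-- ===== LEMMAS AND PROOFS =====

theorem pvTrailB_nil (person : String) : pvTrailB person [] = 0 := rfl

theorem pvTrailB_snoc (person : String) (xs : List String) (y : String) :
    pvTrailB person (xs ++ [y]) =
      if pvIsPer person y = true then pvTrailB person xs + 1 else 0 := by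
  unfold pvTrailB
  rw [List.reverse_append]
  simp [List.takeWhile_cons]
  split_ifs with h <;> simp [h, Nat.add_comm]

theorem pvTrailB_le (person : String) (xs : List String) :
    pvTrailB person xs ≤ xs.length := by
  unfold pvTrailB
  calc (xs.reverse.takeWhile _).length ≤ xs.reverse.length :=
        (List.takeWhile_sublist _).length_le
    _ = xs.length := List.length_reverse

theorem pvTrailB_append (person : String) (xs ys : List String) :
    pvTrailB person (xs ++ ys) =
      if pvTrailB person ys = ys.length then pvTrailB person xs + ys.length
      else pvTrailB person ys := by
  induction ys using List.reverseRecOn with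
  | nil => simp [pvTrailB_nil]
  | append_singleton zs y ih =>
    rw [← List.append_assoc, pvTrailB_snoc, pvTrailB_snoc]
    by_cases hy : pvIsPer person y = true
    · simp only [hy, if_true]
      rw [ih]
      have hle : pvTrailB person zs ≤ zs.length := pvTrailB_le person zs
      by_cases hz : pvTrailB person zs = zs.length
      · simp [hz]; omega
      · have : ¬ (pvTrailB person zs + 1 = zs.length + 1) := by omega
        simp [hz, this]
    · have hlen : ¬ ((0 : Nat) = zs.length + 1) := by omega
      simp [hy, hlen]

-- the entry just past the trailing person suffix is not a person tag
theorem takeWhile_drop_len {α : Type} (p : α → Bool) (l : List α)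
    (h : (l.takeWhile p).length < l.length) :
    (l.drop (l.takeWhile p).length).takeWhile p = [] := by
  induction l with
  | nil => simp
  | cons a l ih =>
    by_cases ha : p a = true
    · simp only [List.takeWhile_cons, ha, if_true] at h ⊢
      simp only [List.length_cons, List.drop_succ_cons]
      exact ih (by simpa using h)
    · simp [List.takeWhile_cons, ha]

theorem pvTrailB_take (person : String) (out : List String)
    (h : pvTrailB person out < out.length) :
    pvTrailB person (out.take (out.length - pvTrailB person out)) = 0 := by
  unfold pvTrailB at *
  rw [List.reverse_take]
  have hc : (List.takeWhile (fun t => pvIsPer person t) out.reverse).length ≤ out.length := by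
    calc _ ≤ out.reverse.length := (List.takeWhile_sublist _).length_le
      _ = out.length := List.length_reverse
  rw [show out.length - (out.length -
        (List.takeWhile (fun t => pvIsPer person t) out.reverse).length)
      = (List.takeWhile (fun t => pvIsPer person t) out.reverse).length by omega]
  rw [takeWhile_drop_len _ _ (by rw [List.length_reverse]; exact h)]
  rfl

-- pvScanBA on a snoc, shifted by one
theorem pvScanBA_snoc (person : String) (xs : List String) (y : String) (j : Nat) :
    1 ≤ j → pvScanBA person (xs ++ [y]) (j + 1) = pvScanBA person xs j + 1 := by
  fun_induction pvScanBA person xs j with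
  | case1 j h ih =>
    intro hj
    have hget : (xs ++ [y]).getD ((xs ++ [y]).length - (j + 1)) "" = xs.getD (xs.length - j) "" := by
      rw [List.getD_append _ _ _ _ (by simp; omega)]
      congr 1
      simp
    conv_lhs => rw [pvScanBA]
    rw [dif_pos ⟨by simp; omega, by rw [hget]; exact h.2⟩]
    exact ih (by omega)
  | case2 j h =>
    intro hj
    by_cases hle : j ≤ xs.length
    · have hper : ¬ pvIsPer person (xs.getD (xs.length - j) "") = true := fun hp => h ⟨hle, hp⟩
      rw [pvScanBA]
      rw [dif_neg]
      intro hc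
      apply hper
      have hget : (xs ++ [y]).getD ((xs ++ [y]).length - (j + 1)) "" = xs.getD (xs.length - j) "" := by
        rw [List.getD_append _ _ _ _ (by simp; omega)]
        congr 1
        simp
      rw [hget] at hc
      exact hc.2
    · rw [pvScanBA]
      rw [dif_neg]
      intro hc
      have := hc.1
      simp at this
      omega

theorem pvScanBA_eq_trail (person : String) (out : List String) :
    pvScanBA person out 1 = pvTrailB person out + 1 := by
  induction out using List.reverseRecOn with
  | nil => rw [pvScanBA]; simp [pvTrailB_nil]
  | append_singleton xs y ih =>
    rw [pvScanBA, pvTrailB_snoc]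
    have hget : (xs ++ [y]).getD ((xs ++ [y]).length - 1) "" = y := by simp
    by_cases hy : pvIsPer person y = true
    · rw [dif_pos ⟨by simp, by rw [hget]; exact hy⟩]
      rw [pvScanBA_snoc person xs y 1 le_rfl, ih]
      simp [hy]
    · rw [dif_neg (fun hc => hy (hget ▸ hc.2)), if_neg hy]

-- the functional form of the first-non-person-index
def pvREnd (tags : List String) (person : String) (n k : Nat) : Nat :=
  if k < n ∧ pvIsPer person (tags.getD k "") = true then pvREnd tags person n (k + 1) else k
termination_by n - k
decreasing_by omega

theorem pvScanFA_eq (tags : List String) (person : String) (n i : Nat) :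
    ∀ j, i + pvScanFA tags person n i j = pvREnd tags person n (i + j) := by
  intro j
  fun_induction pvScanFA tags person n i j with
  | case1 j h ih =>
    rw [pvREnd, if_pos h]
    omega
  | case2 j h =>
    rw [pvREnd, if_neg h]

theorem pvEndsB_aux (tags : List String) (person : String) (n : Nat) :
    ∀ (cnt m : Nat), m + cnt = n →
      (List.range' m cnt).foldr
        (fun k acc => (if pvIsPer person (tags.getD k "") = true then acc.headD n else k) :: acc)
        [n]
      = (List.range' m (cnt + 1)).map (pvREnd tags person n) := by
  intro cnt
  induction cnt with
  | zero =>
    intro m hm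
    simp only [List.range'_succ, List.range'_zero, List.foldr_nil, List.map_cons, List.map_nil]
    have hm' : m = n := by omega
    subst hm'
    rw [pvREnd, if_neg (fun hc => absurd hc.1 (lt_irrefl _))]
  | succ cnt ih =>
    intro m hm
    rw [List.range'_succ, List.foldr_cons, ih (m + 1) (by omega)]
    rw [show List.range' m (cnt + 1 + 1) = m :: List.range' (m + 1) (cnt + 1) from List.range'_succ]
    rw [List.map_cons]
    congr 1
    rw [List.range'_succ, List.map_cons, List.headD_cons]
    rw [show pvREnd tags person n m
        = if pvIsPer person (tags.getD m "") = true then pvREnd tags person n (m + 1) else m by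
      rw [pvREnd]
      by_cases hp : pvIsPer person (tags.getD m "") = true
      · rw [if_pos ⟨by omega, hp⟩, if_pos hp]
      · rw [if_neg (fun hc => hp hc.2), if_neg hp]]

theorem pvEndsB_eq_map (tags : List String) (person : String) (n : Nat) :
    pvEndsB tags person n = (List.range' 0 (n + 1)).map (pvREnd tags person n) := by
  unfold pvEndsB
  rw [List.range_eq_range']
  exact pvEndsB_aux tags person n n 0 (by omega)

theorem pvEndsB_getD (tags : List String) (person : String) (n k : Nat) (hk : k ≤ n) :
    (pvEndsB tags person n).getD k n = pvREnd tags person n k := by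
  rw [pvEndsB_eq_map]
  have hlt : k < ((List.range' 0 (n + 1)).map (pvREnd tags person n)).length := by
    simp; omega
  rw [List.getD_eq_getElem _ _ hlt]
  simp

theorem pvRetagLoopA_eq (mate : String) (out : List String) :
    ∀ s, s ≤ out.length →
    (List.range s).foldl
      (fun o k => o.set (o.length - k - 1) (pvRetag mate (o.getD (o.length - k - 1) ""))) out
    = out.take (out.length - s) ++ (out.drop (out.length - s)).map (pvRetag mate) := by
  intro s
  induction s with
  | zero => intro _; simp
  | succ s ih =>
    intro hs
    rw [List.range_succ, List.foldl_append, ih (by omega)]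
    simp only [List.foldl_cons, List.foldl_nil]
    have hidx : out.length - s - 1 < (out.take (out.length - s)).length := by
      simp
      omega
    have hlt2 : out.length - s - 1 < out.length := by omega
    have hlen : (out.take (out.length - s) ++ (out.drop (out.length - s)).map (pvRetag mate)).length
        = out.length := by
      simp
      try omega
    have hgetP : (out.take (out.length - s) ++ (out.drop (out.length - s)).map (pvRetag mate)).getD
        ((out.take (out.length - s) ++ (out.drop (out.length - s)).map (pvRetag mate)).length - s - 1) ""
        = out.getD (out.length - s - 1) "" := by
      rw [hlen, List.getD_append _ _ _ _ hidx, List.getD_eq_getElem _ _ hidx, List.getElem_take,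
        ← List.getD_eq_getElem _ _ hlt2]
    rw [hgetP, hlen, List.set_append, if_pos hidx]
    have hsub : out.length - s = (out.length - s - 1) + 1 := by omega
    rw [hsub, List.take_succ, List.getElem?_eq_getElem hlt2]
    simp only [Option.toList_some]
    rw [List.set_append, if_neg (by simp)]
    simp only [Nat.add_sub_cancel]
    have hzero : out.length - s - 1 - (List.take (out.length - s - 1) out).length = 0 := by
      simp
      try omega
    rw [hzero, List.set_cons_zero]
    have hds : out.length - (s + 1) = out.length - s - 1 := by omega
    rw [hds, List.drop_eq_getElem_cons hlt2, List.map_cons]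
    rw [List.getD_eq_getElem _ _ hlt2]
    simp [List.append_assoc]

theorem pv_main (tokens tags : List String) (person mate : String) (i : Nat) (out : List String) :
    ∀ (fuel streak : Nat),
      streak = pvTrailB person out → tokens.length - i ≤ fuel →
      pvGoA tokens tags person mate i out =
        pvGoB tokens tags person mate ("B-" ++ person)
          (pvEndsB tags person tokens.length) fuel i out streak := by
  fun_induction pvGoA tokens tags person mate i out with
  | case1 i out hlt tok tag hcond j run newr ih =>
    intro fuel streak hstreak hfuel
    cases fuel with
    | zero => omega
    | succ f =>
      have hcond' : i + 1 < tokens.length ∧ tokens.getD i "" = "," ∧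
          tags.getD (i + 1) "" = "B-" ++ person := hcond
      have hj : j = pvScanFA tags person tokens.length i 1 := rfl
      have hge : 1 ≤ j := hj ▸ pvScanFA_ge tags person tokens.length i 1
      have hend : (pvEndsB tags person tokens.length).getD (i + 1) tokens.length = i + j := by
        rw [pvEndsB_getD tags person tokens.length (i + 1) (by omega), hj]
        exact (pvScanFA_eq tags person tokens.length i 1).symm
      simp only [pvGoB]
      rw [if_pos hlt, if_pos hcond', hend]
      have hS : (if pvTrailB person (tag :: newr) = (tag :: newr).length
            then streak + pvTrailB person (tag :: newr) else pvTrailB person (tag :: newr))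
          = pvTrailB person (out ++ tag :: newr) := by
        rw [pvTrailB_append, hstreak]
        split_ifs with hc
        · rw [hc]
        · rfl
      exact ih f _ hS (by omega)
  | case2 i out hlt tok tag hnc hcond j out2 ih =>
    intro fuel streak hstreak hfuel
    cases fuel with
    | zero => omega
    | succ f =>
      have hnc' : ¬ (i + 1 < tokens.length ∧ tokens.getD i "" = "," ∧
          tags.getD (i + 1) "" = "B-" ++ person) := hnc
      have hcond' : 0 < i ∧ tokens.getD i "" = "," ∧
          pvIsPer person (tags.getD (i - 1) "") = true := hcond
      have hj : j = streak + 1 := by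
        have h1 : j = pvScanBA person out 1 := rfl
        rw [h1, pvScanBA_eq_trail, hstreak]
      have hsle : streak ≤ out.length := hstreak ▸ pvTrailB_le person out
      have hcondeq : (out.length < j ∨
            pvLastIn (tokens.getD (i - j) "") [',', '.', '!', '?', '('] = true) ↔
          (streak = out.length ∨
            pvLastIn (tokens.getD (i - 1 - streak) "") [',', '.', '!', '?', '('] = true) := by
        rw [hj, show i - (streak + 1) = i - 1 - streak by omega]
        constructor
        · rintro (hl | hr)
          · left; omega
          · right; exact hr
        · rintro (hl | hr)
          · left; omega
          · right; exact hr
      simp only [pvGoB]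
      rw [if_pos hlt, if_neg hnc', if_pos hcond']
      by_cases hcB : streak = out.length ∨
          pvLastIn (tokens.getD (i - 1 - streak) "") [',', '.', '!', '?', '('] = true
      · rw [if_pos hcB]
        have hout2 : out2 = out.take (out.length - streak) ++
            (out.drop (out.length - streak)).map (pvRetag mate) := by
          have : out2 = pvRetagLoopA mate out j := if_pos (hcondeq.mpr hcB)
          rw [this, pvRetagLoopA, hj, Nat.add_sub_cancel]
          exact pvRetagLoopA_eq mate out streak hsle
        have hTL : pvTrailB person (out.take (out.length - streak) ++
              (out.drop (out.length - streak)).map (pvRetag mate))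
            = pvTrailB person ((out.drop (out.length - streak)).map (pvRetag mate)) := by
          rw [pvTrailB_append]
          split_ifs with hc
          · rw [hc]
            have hLlen : ((out.drop (out.length - streak)).map (pvRetag mate)).length = streak := by
              simp
              omega
            by_cases hse : streak = out.length
            · simp [hse, pvTrailB_nil]
            · have hlt' : pvTrailB person out < out.length := by omega
              have h0 := pvTrailB_take person out hlt'
              rw [← hstreak] at h0
              rw [h0, Nat.zero_add]
          · rfl
        rw [hout2] at ih ⊢
        have hS : (if pvIsPer person (tags.getD i "") = true
              then pvTrailB person ((out.drop (out.length - streak)).map (pvRetag mate)) + 1 else 0)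
            = pvTrailB person ((out.take (out.length - streak) ++
                (out.drop (out.length - streak)).map (pvRetag mate)) ++ [tags.getD i ""]) := by
          rw [pvTrailB_snoc, hTL]
        exact ih f _ hS (by omega)
      · rw [if_neg hcB]
        have hout2 : out2 = out := if_neg (fun hc => hcB (hcondeq.mp hc))
        rw [hout2] at ih ⊢
        have hS : (if pvIsPer person (tags.getD i "") = true then streak + 1 else 0)
            = pvTrailB person (out ++ [tags.getD i ""]) := by
          rw [pvTrailB_snoc, hstreak]
        exact ih f _ hS (by omega)
  | case3 i out hlt tok tag hnc1 hnc2 ih =>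
    intro fuel streak hstreak hfuel
    cases fuel with
    | zero => omega
    | succ f =>
      have hnc1' : ¬ (i + 1 < tokens.length ∧ tokens.getD i "" = "," ∧
          tags.getD (i + 1) "" = "B-" ++ person) := hnc1
      have hnc2' : ¬ (0 < i ∧ tokens.getD i "" = "," ∧
          pvIsPer person (tags.getD (i - 1) "") = true) := hnc2
      simp only [pvGoB]
      rw [if_pos hlt, if_neg hnc1', if_neg hnc2']
      have hS : (if pvIsPer person (tags.getD i "") = true then streak + 1 else 0)
          = pvTrailB person (out ++ [tags.getD i ""]) := by
        rw [pvTrailB_snoc, hstreak]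
      exact ih f _ hS (by omega)
  | case4 i out hge =>
    intro fuel streak _ _
    cases fuel with
    | zero => rfl
    | succ f =>
      simp only [pvGoB]
      rw [if_neg hge]

-- ===== VERDICT (by name: the statement is the Claim_ definition above) =====
theorem tag_mate_gooser_name_spec : Claim_equal_tag_mate_gooser_name := by
  intro tokens tags person mate _ _
  unfold Spec_tag_mate_gooser_name tag_mate_gooser_name tag_mate_gooser_name_alt
  by_cases h : ("B-" ++ person) ∈ tags
  · simp only [List.elem_eq_true_of_mem h, if_true]
    exact congrArg _ (pv_main tokens tags person mate 0 [] tokens.length 0 rfl (by omega))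
  · simp [h]
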